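-- pv_equiv track=rewrite | github.com/jupinter/Automatic_Speech_Recognition | speechvalley/feature/madarian/digit2character.py | replaceInteger
-- ===== SOURCE A (Python) =====
-- def replaceInteger(integer_set, sub_str):
--     '''
--     Replacing integer numbers with Chinese expression
--     '''
--     int_str_set = []
--     for inte in integer_set:
--         int_str=integer2Chinese(int(inte))
--         int_str_set.append(int_str)
--     newStr=''
--     count=0
--     for c in sub_str:
--         if c=='_':
--             newStr+=int_str_set[count]
--             count+=1
--         else:
--             newStr+=c
--     return newStr
--
-- def section2Chinese(section):
--     '''
--     Converting section to Chinese expression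
--     '''
--     result=''
--     charNumSet=['零', '一', '二', '三', '四',
--                 '五', '六', '七', '八', '九']
--     charUnitSet=['', '十', '百', '千']
--     zero=True
--     unitPos=0
--     while section>0:
--         v=section%10
--         if v==0:
--             if section==0 or zero is False:
--                 zero=True
--                 result=charNumSet[v]+result
--         elif (section//10)==0 and v==1 and unitPos==1:
--             result=charUnitSet[1]+result
--         else:
--             zero=False
--             strIns=charNumSet[v]
--             strIns+=charUnitSet[unitPos]
--             result=strIns+result
--         unitPos+=1
--         section=section//10
--     return result
--
-- def integer2Chinese(number):
--     '''
--     Converting integer to Chinese expression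
--     '''
--     charSectionSet=['', '万', '亿', '万亿']
--     result=''
--     zero=False
--     unitPos=0
--     if number==0:
--         return '零'
--     while number>0:
--         section=number%10000
--         if zero:
--             result='零'+result
--         sec_result = section2Chinese(section)
--         if section!=0:
--             sec_result+=charSectionSet[unitPos]
--         result=sec_result+result
--         if section<1000 and section>0:
--             zero=True
--         number=number//10000
--         unitPos+=1
--     return result
-- ===== SOURCE B (Python) =====
-- def section2Chinese(section):
--     '''
--     Converting section to Chinese: pure recursion over the digits
--     (low to high) instead of a while-loop with mutable flags.
--     '''
--     nums = '\u96f6\u4e00\u4e8c\u4e09\u56db\u4e94\u516d\u4e03\u516b\u4e5d'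
--     units = ['', '\u5341', '\u767e', '\u5343']
--     def go(s, pos, zero):
--         if s <= 0:
--             return ''
--         v = s % 10
--         if v == 0:
--             return go(s // 10, pos + 1, True) + ('' if zero else '\u96f6')
--         if s // 10 == 0 and v == 1 and pos == 1:
--             return units[1]
--         return go(s // 10, pos + 1, False) + nums[v] + units[pos]
--     return go(section, 0, True)
--
-- def integer2Chinese(number):
--     '''
--     Converting integer to Chinese: first split into base-10000 sections,
--     then emit the sections top-down, appending the separator '\u96f6' after a
--     section whenever some lower section lies in (0, 1000).
--     '''
--     if number == 0:
--         return '\u96f6'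
--     secs = []
--     n = number
--     while n > 0:
--         secs.append(n % 10000)
--         n = n // 10000
--     sec_units = ['', '\u4e07', '\u4ebf', '\u4e07\u4ebf']
--     pieces = []
--     for i in reversed(range(len(secs))):
--         s = secs[i]
--         piece = section2Chinese(s)
--         if s != 0:
--             piece += sec_units[i]
--         if any(0 < t < 1000 for t in secs[:i]):
--             piece += '\u96f6'
--         pieces.append(piece)
--     return ''.join(pieces)
--
-- def replaceInteger(integer_set, sub_str):
--     '''
--     Replacing integer numbers with Chinese expression
--     (split-and-interleave instead of a char-by-char scan with a counter)
--     '''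
--     converted = [integer2Chinese(int(i)) for i in integer_set]
--     parts = sub_str.split('_')
--     pieces = [parts[0]]
--     for idx in range(len(parts) - 1):
--         pieces.append(converted[idx])
--         pieces.append(parts[idx + 1])
--     return ''.join(pieces)
-- ===== Notes on version B (the rewrite author's own statement) =====
-- stated objective: alternative
-- what changed: B rebuilds all three stages differently: sections are rendered by a pure recursion over the digits instead of a while-loop with mutable result/zero/unitPos state, integers are converted by first materialising the base-10000 section list and joining the rendered sections top-down with a closed-form zero-separator condition (some lower section in (0,1000)) instead of threading a persistent flag, and the template is filled by splitting on '_' and interleaving by index instead of a char-by-char scan with a counter.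
import Mathlib
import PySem

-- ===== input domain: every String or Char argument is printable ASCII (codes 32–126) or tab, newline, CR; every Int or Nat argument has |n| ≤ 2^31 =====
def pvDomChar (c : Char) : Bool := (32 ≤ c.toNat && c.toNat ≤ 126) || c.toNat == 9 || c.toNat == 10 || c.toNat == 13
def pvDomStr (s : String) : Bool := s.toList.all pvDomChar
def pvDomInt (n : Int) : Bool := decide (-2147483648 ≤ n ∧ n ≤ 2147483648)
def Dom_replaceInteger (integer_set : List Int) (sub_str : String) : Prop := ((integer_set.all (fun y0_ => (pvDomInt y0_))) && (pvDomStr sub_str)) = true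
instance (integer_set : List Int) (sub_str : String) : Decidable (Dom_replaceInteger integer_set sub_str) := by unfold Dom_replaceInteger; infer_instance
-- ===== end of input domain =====

-- B rebuilds the converters functionally (recursive digit walk for sections, staged section-list + top-down join for integers) and fills the template by split-and-interleave instead of A's char scan with a counter.


-- ===== PORT A =====
-- A's helpers section2Chinese / integer2Chinese, transliterated: Python strings are
-- List Char, 'while' loops become recursion over the same mutable state.

def pvCharNumSet : List (List Char) :=
  [['零'], ['一'], ['二'], ['三'], ['四'], ['五'], ['六'], ['七'], ['八'], ['九']]
def pvCharUnitSet : List (List Char) := [[], ['十'], ['百'], ['千']]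
def pvCharSectionSet : List (List Char) := [[], ['万'], ['亿'], ['万', '亿']]

-- list indexing charNumSet[v]: pyGet? (the callers keep it in range; getD [] never fires there)
def pvIdx (xs : List (List Char)) (i : Int) : List Char := (PySem.List.pyGet? xs i).getD []

-- the while loop, as structural recursion on a fuel that bounds the iteration count
def section2ChineseGo (fuel : Nat) (result : List Char) (zero : Bool) (unitPos : Nat) (sec : Int) : List Char :=
  match fuel with
  | 0 => result
  | fuel + 1 =>
    if sec > 0 then
      let v := PySem.Int.mod sec 10
      let (result, zero) :=
        if v = 0 then
          if sec = 0 ∨ zero = false then (pvIdx pvCharNumSet v ++ result, true)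
          else (result, zero)
        else if PySem.Int.floordiv sec 10 = 0 ∧ v = 1 ∧ unitPos = 1 then
          (pvIdx pvCharUnitSet 1 ++ result, zero)
        else
          ((pvIdx pvCharNumSet v ++ pvIdx pvCharUnitSet unitPos) ++ result, false)
      section2ChineseGo fuel result zero (unitPos + 1) (PySem.Int.floordiv sec 10)
    else result

def section2Chinese (sec : Int) : List Char := section2ChineseGo sec.toNat [] true 0 sec

def integer2ChineseGo (fuel : Nat) (result : List Char) (zero : Bool) (unitPos : Nat) (number : Int) : List Char :=
  match fuel with
  | 0 => result
  | fuel + 1 =>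
    if number > 0 then
      let sec := PySem.Int.mod number 10000
      let result := if zero then '零' :: result else result
      let sec_result := section2Chinese sec
      let sec_result := if sec ≠ 0 then sec_result ++ pvIdx pvCharSectionSet unitPos else sec_result
      let result := sec_result ++ result
      let zero := if sec < 1000 ∧ sec > 0 then true else zero
      integer2ChineseGo fuel result zero (unitPos + 1) (PySem.Int.floordiv number 10000)
    else result

def integer2Chinese (number : Int) : List Char :=
  if number = 0 then ['零'] else integer2ChineseGo number.toNat [] false 0 number

-- the char-scan of A: state (newStr, count); int_str_set[count] is pyGet? (Pre_ keeps it in range)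
def replaceInteger (integer_set : List Int) (sub_str : String) : String :=
  let int_str_set := integer_set.foldl (fun acc inte => acc ++ [integer2Chinese inte]) []
  let res := sub_str.toList.foldl
    (fun (st : List Char × Nat) c =>
      if c = '_' then (st.1 ++ (PySem.List.pyGet? int_str_set (st.2 : Int)).getD [], st.2 + 1)
      else (st.1 ++ [c], st.2))
    ([], 0)
  String.ofList res.1

-- ===== PORT B =====
-- B's own converters: a recursive digit walk for sections, and for integers a staged
-- pipeline (build the base-10000 section list, then join the rendered sections top-down).

def pvNums : List Char := ['零','一','二','三','四','五','六','七','八','九']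

-- Source B's inner go(s, pos, zero): plain recursion, no accumulator
def sec2BGo (fuel : Nat) (s : Int) (pos : Nat) (zero : Bool) : List Char :=
  match fuel with
  | 0 => []
  | fuel + 1 =>
    if s > 0 then
      let v := PySem.Int.mod s 10
      if v = 0 then
        sec2BGo fuel (PySem.Int.floordiv s 10) (pos + 1) true ++ (if zero then [] else ['零'])
      else if PySem.Int.floordiv s 10 = 0 ∧ v = 1 ∧ pos = 1 then
        pvIdx pvCharUnitSet 1
      else
        sec2BGo fuel (PySem.Int.floordiv s 10) (pos + 1) false
          ++ [(PySem.List.pyGet? pvNums v).getD '?'] ++ pvIdx pvCharUnitSet (pos : Int)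
    else []

def sec2B (sec_ : Int) : List Char := sec2BGo sec_.toNat sec_ 0 true

-- the while-loop building secs = [n % 10000, (n // 10000) % 10000, …]
def pvSecsOf (fuel : Nat) (n : Int) : List Int :=
  match fuel with
  | 0 => []
  | fuel + 1 =>
    if n > 0 then PySem.Int.mod n 10000 :: pvSecsOf fuel (PySem.Int.floordiv n 10000) else []

def integer2ChineseB (number : Int) : List Char :=
  if number = 0 then ['零'] else
    let secs := pvSecsOf number.toNat number
    -- for i in reversed(range(len(secs))): … pieces.append(piece)
    let pieces := ((PySem.List.pyRange 0 (secs.length : Int) 1).reverse).foldl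
      (fun (acc : List (List Char)) i =>
        let s := (PySem.List.pyGet? secs i).getD 0
        let piece := sec2B s
        let piece := if s ≠ 0 then piece ++ pvIdx pvCharSectionSet i else piece
        let piece :=
          if (PySem.List.slice secs none (some i)).any (fun t => decide (0 < t ∧ t < 1000))
          then piece ++ ['零'] else piece
        acc ++ [piece]) []
    PySem.Chars.join [] pieces

def replaceInteger_alt (integer_set : List Int) (sub_str : String) : String :=
  let converted := integer_set.map (fun i => integer2ChineseB i)
  let parts := PySem.Chars.splitOn sub_str.toList ['_']
  let pieces := (PySem.List.pyRange 0 ((parts.length : Int) - 1) 1).foldl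
    (fun acc idx =>
      acc ++ [(PySem.List.pyGet? converted idx).getD [], (PySem.List.pyGet? parts (idx + 1)).getD []])
    [(PySem.List.pyGet? parts 0).getD []]
  String.ofList (PySem.Chars.join [] pieces)

-- ===== PRECONDITION & SPEC =====
-- Pre_ excludes exactly the inputs where Python A raises IndexError: more '_' placeholders than integers.
def Pre_replaceInteger (integer_set : List Int) (sub_str : String) : Prop :=
  sub_str.toList.count '_' ≤ integer_set.length
instance (integer_set : List Int) (sub_str : String) : Decidable (Pre_replaceInteger integer_set sub_str) := by unfold Pre_replaceInteger; infer_instance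

def pvWitness_replaceInteger : List Int × String := ([12345, 7], "a_b_c")

def Spec_replaceInteger (integer_set : List Int) (sub_str : String) (out : String) : Prop := out = replaceInteger_alt integer_set sub_str
instance (integer_set : List Int) (sub_str : String) (out : String) : Decidable (Spec_replaceInteger integer_set sub_str out) := by unfold Spec_replaceInteger; infer_instance

-- ===== CLAIM (what is proved, stated in full; the proofs are below) =====
def Claim_equal_replaceInteger : Prop := ∀ (integer_set : List Int) (sub_str : String), Dom_replaceInteger integer_set sub_str → Pre_replaceInteger integer_set sub_str → Spec_replaceInteger integer_set sub_str (replaceInteger integer_set sub_str)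

-- ===== LEMMAS AND PROOFS =====

lemma pv_fdiv_lt10 (s : Int) (h : s > 0) : (PySem.Int.floordiv s 10).toNat < s.toNat := by
  simp only [PySem.Int.floordiv]
  rw [Int.fdiv_eq_ediv, if_pos (Or.inl (by omega))]
  omega

lemma pv_fdiv_lt10000 (s : Int) (h : s > 0) : (PySem.Int.floordiv s 10000).toNat < s.toNat := by
  simp only [PySem.Int.floordiv]
  rw [Int.fdiv_eq_ediv, if_pos (Or.inl (by omega))]
  omega

-- ---- sections: A's accumulator loop equals B's plain recursion ----
lemma pv_num_idx (v : Int) (h0 : 0 ≤ v) (h1 : v < 10) :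
    pvIdx pvCharNumSet v = [(PySem.List.pyGet? pvNums v).getD '?'] := by
  interval_cases v <;> rfl

lemma pv_secB_nonpos (fuel : Nat) (s : Int) (pos : Nat) (z : Bool) (h : ¬ s > 0) :
    sec2BGo fuel s pos z = [] := by
  cases fuel with
  | zero => rfl
  | succ fuel => simp [sec2BGo, h]

lemma pv_sec_go_eq (fuelA : Nat) : ∀ (s : Int), s.toNat ≤ fuelA →
    ∀ (fuelB : Nat), s.toNat ≤ fuelB → ∀ (r : List Char) (z : Bool) (u : Nat),
      section2ChineseGo fuelA r z u s = sec2BGo fuelB s u z ++ r := by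
  induction fuelA with
  | zero =>
    intro s hs fuelB _ r z u
    rw [pv_secB_nonpos fuelB s u z (by omega)]
    rfl
  | succ fuelA ih =>
    intro s hs fuelB hsB r z u
    by_cases h : s > 0
    · obtain ⟨fuelB', rfl⟩ : ∃ k, fuelB = k + 1 := ⟨fuelB - 1, by omega⟩
      have hrecA : (PySem.Int.floordiv s 10).toNat ≤ fuelA := by
        have := pv_fdiv_lt10 s h; omega
      have hrecB : (PySem.Int.floordiv s 10).toNat ≤ fuelB' := by
        have := pv_fdiv_lt10 s h; omega
      rw [section2ChineseGo, sec2BGo]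
      simp only [if_pos h]
      by_cases hv : PySem.Int.mod s 10 = 0
      · cases z with
        | false =>
          simp only [hv, reduceIte, Bool.false_eq_true, or_true, if_true]
          rw [ih _ hrecA _ hrecB]
          rw [show pvIdx pvCharNumSet 0 = ['零'] from rfl]
          simp
        | true =>
          have hcond : ¬ (s = 0 ∨ (true : Bool) = false) := by
            rintro (h1 | h2)
            · omega
            · simp at h2
          simp only [hv, reduceIte, if_neg hcond]
          rw [ih _ hrecA _ hrecB]
          simp
      · by_cases hsp : PySem.Int.floordiv s 10 = 0 ∧ PySem.Int.mod s 10 = 1 ∧ u = 1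
        · simp only [if_neg hv, if_pos hsp]
          rw [ih _ hrecA _ hrecB, pv_secB_nonpos fuelB' _ _ _ (by rw [hsp.1]; omega)]
          simp
        · simp only [if_neg hv, if_neg hsp]
          rw [ih _ hrecA _ hrecB]
          have hv0 : 0 ≤ PySem.Int.mod s 10 := PySem.Int.mod_nonneg (a := s) (b := 10) (by omega)
          have hv10 : PySem.Int.mod s 10 < 10 := PySem.Int.mod_lt (a := s) (b := 10) (by omega)
          rw [pv_num_idx _ hv0 hv10]
          simp
    · rw [section2ChineseGo, pv_secB_nonpos fuelB s u z h]
      simp [h]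

lemma pv_sec_eq (s : Int) : section2Chinese s = sec2B s := by
  rw [section2Chinese, sec2B, pv_sec_go_eq s.toNat s le_rfl s.toNat le_rfl]
  simp

-- ---- integers: characterise A's loop over the section list ----
def pvCond (t : Int) : Bool := decide (0 < t ∧ t < 1000)

def pvPiece (s : Int) (z : Bool) (u : Nat) : List Char :=
  (if s ≠ 0 then section2Chinese s ++ pvIdx pvCharSectionSet (u : Int) else section2Chinese s)
    ++ (if z then ['零'] else [])

def pvG : List Int → Bool → Nat → List Char
  | [], _, _ => []
  | s :: rest, z, u =>
      pvG rest (if s < 1000 ∧ s > 0 then true else z) (u + 1) ++ pvPiece s z u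

lemma pv_secsOf_nonpos (fuel : Nat) (n : Int) (h : ¬ n > 0) : pvSecsOf fuel n = [] := by
  cases fuel with
  | zero => rfl
  | succ fuel => simp [pvSecsOf, h]

lemma pv_goA_eq (fuelA : Nat) : ∀ (n : Int), n.toNat ≤ fuelA →
    ∀ (fuelS : Nat), n.toNat ≤ fuelS → ∀ (r : List Char) (z : Bool) (u : Nat),
      integer2ChineseGo fuelA r z u n = pvG (pvSecsOf fuelS n) z u ++ r := by
  induction fuelA with
  | zero =>
    intro n hn fuelS _ r z u
    rw [pv_secsOf_nonpos fuelS n (by omega)]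
    simp [integer2ChineseGo, pvG]
  | succ fuelA ih =>
    intro n hn fuelS hnS r z u
    by_cases h : n > 0
    · obtain ⟨fuelS', rfl⟩ : ∃ k, fuelS = k + 1 := ⟨fuelS - 1, by omega⟩
      have hrecA : (PySem.Int.floordiv n 10000).toNat ≤ fuelA := by
        have := pv_fdiv_lt10000 n h; omega
      have hrecS : (PySem.Int.floordiv n 10000).toNat ≤ fuelS' := by
        have := pv_fdiv_lt10000 n h; omega
      rw [integer2ChineseGo, pvSecsOf]
      simp only [if_pos h]
      rw [ih _ hrecA _ hrecS]
      simp only [pvG, pvPiece]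
      by_cases hz : z
      · simp [hz]
      · simp [hz]
    · rw [integer2ChineseGo, pv_secsOf_nonpos fuelS n h]
      simp [h, pvG]

-- indexed (big-endian) form of the same concatenation
def pvPieceAt (secs : List Int) (z : Bool) (u : Nat) (i : Nat) : List Char :=
  (if secs.getD i 0 ≠ 0 then section2Chinese (secs.getD i 0) ++ pvIdx pvCharSectionSet ((u + i : Nat) : Int)
   else section2Chinese (secs.getD i 0))
    ++ (if (z || (secs.take i).any pvCond) then ['零'] else [])

def pvDown (secs : List Int) (z : Bool) (u : Nat) : Nat → List Char
  | 0 => []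
  | i + 1 => pvPieceAt secs z u i ++ pvDown secs z u i

lemma pv_pieceAt_succ (s : Int) (rest : List Int) (z : Bool) (u j : Nat) :
    pvPieceAt (s :: rest) z u (j + 1)
      = pvPieceAt rest (if s < 1000 ∧ s > 0 then true else z) (u + 1) j := by
  unfold pvPieceAt
  have h1 : (s :: rest).getD (j + 1) 0 = rest.getD j 0 := by simp [List.getD]
  have h2 : ((s :: rest).take (j + 1)).any pvCond = (pvCond s || (rest.take j).any pvCond) := by
    simp [List.take_succ_cons]
  have h3 : (z || ((s :: rest).take (j+1)).any pvCond)
      = ((if s < 1000 ∧ s > 0 then true else z) || (rest.take j).any pvCond) := by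
    rw [h2]
    by_cases hc : s < 1000 ∧ s > 0
    · rw [if_pos hc]
      have : pvCond s = true := by unfold pvCond; exact decide_eq_true (by omega)
      simp [this]
    · rw [if_neg hc]
      have : pvCond s = false := by unfold pvCond; exact decide_eq_false (by omega)
      simp [this]
  rw [h1, h3]
  have h4 : u + (j + 1) = (u + 1) + j := by omega
  rw [h4]

lemma pv_down_shift (s : Int) (rest : List Int) (z : Bool) (u : Nat) :
    ∀ i : Nat, pvDown (s :: rest) z u (i + 1)
      = pvDown rest (if s < 1000 ∧ s > 0 then true else z) (u + 1) i ++ pvPieceAt (s :: rest) z u 0 := by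
  intro i
  induction i with
  | zero => simp [pvDown]
  | succ j ihj =>
    rw [show pvDown (s :: rest) z u (j + 1 + 1)
          = pvPieceAt (s :: rest) z u (j + 1) ++ pvDown (s :: rest) z u (j + 1) from rfl,
        ihj, pv_pieceAt_succ]
    rw [show pvDown rest (if s < 1000 ∧ s > 0 then true else z) (u + 1) (j + 1)
          = pvPieceAt rest (if s < 1000 ∧ s > 0 then true else z) (u + 1) j
            ++ pvDown rest (if s < 1000 ∧ s > 0 then true else z) (u + 1) j from rfl]
    simp

lemma pv_G_eq_down : ∀ (secs : List Int) (z : Bool) (u : Nat),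
    pvG secs z u = pvDown secs z u secs.length := by
  intro secs
  induction secs with
  | nil => intro z u; simp [pvG, pvDown]
  | cons s rest ih =>
    intro z u
    rw [show pvG (s :: rest) z u
          = pvG rest (if s < 1000 ∧ s > 0 then true else z) (u + 1) ++ pvPiece s z u from rfl,
        ih, List.length_cons, pv_down_shift]
    congr 1
    unfold pvPieceAt pvPiece
    simp

-- ---- B's loop: fold over reversed(range(len)) flattened to the same indexed form ----
lemma pv_foldl_append_map {α : Type} (g : α → List Char) :
    ∀ (l : List α) (acc : List (List Char)),
      l.foldl (fun acc i => acc ++ [g i]) acc = acc ++ l.map g := by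
  intro l
  induction l with
  | nil => intro acc; simp
  | cons x xs ih => intro acc; simp [ih]

def pvFold (g : Int → List Char) : Nat → List Char
  | 0 => []
  | k + 1 => g (k : Int) ++ pvFold g k

lemma pv_revrange_flatten (g : Int → List Char) :
    ∀ k : Nat, (((PySem.List.pyRange 0 (k : Int) 1).reverse).map g).flatten = pvFold g k := by
  intro k
  induction k with
  | zero => simp [PySem.List.pyRange_one_eq_nil, pvFold]
  | succ k ihk =>
    rw [show ((k + 1 : Nat) : Int) = (k : Int) + 1 by push_cast; ring,
        PySem.List.pyRange_one_succ_right (by positivity)]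
    simp only [List.reverse_append, List.reverse_cons, List.reverse_nil, List.nil_append,
      List.singleton_append, List.map_cons, List.flatten_cons, ihk]
    rfl

lemma pv_join_flatten (parts : List (List Char)) :
    PySem.Chars.join [] parts = parts.flatten := by
  induction parts with
  | nil => exact PySem.Chars.join_nil []
  | cons a l ih =>
    cases l with
    | nil => simp [PySem.Chars.join, List.intercalate]
    | cons b t =>
      rw [PySem.Chars.join_cons_cons, ih]
      simp

-- B's loop body at a Nat index is exactly pvPieceAt with z = false, u = 0 (via sec equality)
lemma pv_pieceB_eq (secs : List Int) (i : Nat) (hi : i < secs.length) :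
    (let s := (PySem.List.pyGet? secs (i : Int)).getD 0
     let piece := sec2B s
     let piece := if s ≠ 0 then piece ++ pvIdx pvCharSectionSet (i : Int) else piece
     let piece :=
       if (PySem.List.slice secs none (some (i : Int))).any (fun t => decide (0 < t ∧ t < 1000))
       then piece ++ ['零'] else piece
     piece) = pvPieceAt secs false 0 i := by
  have hs : (PySem.List.pyGet? secs (i : Int)).getD 0 = secs.getD i 0 := by
    simp [PySem.List.pyGet?_natCast, List.getD, List.getElem?_eq_getElem hi]
  have hsl : PySem.List.slice secs none (some (i : Int)) = secs.take i :=
    PySem.List.slice_to_natCast secs i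
  simp only [hs, hsl, pvPieceAt, ← pv_sec_eq]
  have : ((fun t => decide (0 < t ∧ t < 1000)) : Int → Bool) = pvCond := by
    funext t; rfl
  rw [this]
  simp only [Bool.false_or, Nat.zero_add]
  split_ifs <;> simp

lemma pv_i2c_eq (n : Int) : integer2Chinese n = integer2ChineseB n := by
  by_cases h0 : n = 0
  · simp [integer2Chinese, integer2ChineseB, h0]
  · simp only [integer2Chinese, integer2ChineseB, if_neg h0]
    rw [pv_goA_eq n.toNat n le_rfl n.toNat le_rfl [] false 0, List.append_nil, pv_G_eq_down]
    rw [pv_foldl_append_map, List.nil_append, pv_join_flatten, pv_revrange_flatten]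
    set secs := pvSecsOf n.toNat n with hsecs
    have : ∀ k : Nat, k ≤ secs.length →
        pvDown secs false 0 k
          = pvFold (fun i =>
              let s := (PySem.List.pyGet? secs i).getD 0
              let piece := sec2B s
              let piece := if s ≠ 0 then piece ++ pvIdx pvCharSectionSet i else piece
              let piece :=
                if (PySem.List.slice secs none (some i)).any (fun t => decide (0 < t ∧ t < 1000))
                then piece ++ ['零'] else piece
              piece) k := by
      intro k
      induction k with
      | zero => intro _; rfl
      | succ j ihj =>
        intro hk
        rw [show pvDown secs false 0 (j + 1) = pvPieceAt secs false 0 j ++ pvDown secs false 0 j from rfl,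
            ihj (by omega), pvFold, pv_pieceB_eq secs j (by omega)]
    exact (this secs.length le_rfl)

-- ---- the template: A's scan equals B's split-and-interleave ----
def pvGet (conv : List (List Char)) (k : Nat) : List Char :=
  conv[k]?.getD []

-- semantics of A's remaining scan
def pvScan (conv : List (List Char)) : List Char → Nat → List Char
  | [], _ => []
  | c :: cs, k =>
      if c = '_' then pvGet conv k ++ pvScan conv cs (k + 1) else c :: pvScan conv cs k

-- recursive characterisation of splitting on '_'
def pvSplit1 : List Char → List (List Char)
  | [] => [[]]
  | c :: cs => if c = '_' then [] :: pvSplit1 cs else (pvSplit1 cs).modifyHead (c :: ·)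

-- interleaving of conv entries (from index k) with the tail parts
def pvInter (conv : List (List Char)) : Nat → List (List Char) → List Char
  | _, [] => []
  | k, p :: ps => pvGet conv k ++ p ++ pvInter conv (k + 1) ps

-- the list of pieces B's loop appends from index j on
def pvPieces (conv rest : List (List Char)) (j : Nat) : List (List Char) :=
  if h : j < rest.length then
    pvGet conv j :: rest[j] :: pvPieces conv rest (j + 1)
  else []
termination_by rest.length - j

lemma pvSplit1_ne_nil (cs : List Char) : pvSplit1 cs ≠ [] := by
  induction cs with
  | nil => simp [pvSplit1]
  | cons c cs ih =>
    simp only [pvSplit1]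
    split
    · simp
    · cases hts : pvSplit1 cs with
      | nil => exact absurd hts ih
      | cons t ts => simp

lemma pv_foldA (conv : List (List Char)) (cs : List Char) :
    ∀ (acc : List Char) (k : Nat),
      (cs.foldl
        (fun (st : List Char × Nat) c =>
          if c = '_' then (st.1 ++ conv[st.2]?.getD [], st.2 + 1)
          else (st.1 ++ [c], st.2)) (acc, k)).1 = acc ++ pvScan conv cs k := by
  induction cs with
  | nil => intro acc k; simp [pvScan]
  | cons c cs ih =>
    intro acc k
    rw [List.foldl_cons]
    by_cases h : c = '_'
    · rw [if_pos h, ih]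
      simp [pvScan, h, pvGet]
    · rw [if_neg h, ih]
      simp [pvScan, h]

lemma pv_splitOn_go (fuel : Nat) :
    ∀ (l cur : List Char) (acc : List (List Char)), l.length < fuel →
      PySem.Chars.splitOn.go ['_'] fuel l cur acc
        = acc.reverse ++ (pvSplit1 l).modifyHead (cur.reverse ++ ·) := by
  induction fuel with
  | zero => intro l cur acc h; omega
  | succ fuel ih =>
    intro l cur acc h
    cases l with
    | nil => simp [PySem.Chars.splitOn.go, pvSplit1]
    | cons c rest =>
      by_cases hc : c = '_'
      · subst hc
        rw [show PySem.Chars.splitOn.go ['_'] (fuel + 1) ('_' :: rest) cur acc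
              = PySem.Chars.splitOn.go ['_'] fuel rest [] (cur.reverse :: acc) by
            simp [PySem.Chars.splitOn.go, List.isPrefixOf]]
        rw [ih rest [] (cur.reverse :: acc) (by simpa using Nat.lt_of_succ_lt_succ h)]
        simp [pvSplit1]
        cases hts : pvSplit1 rest with
        | nil => exact absurd hts (pvSplit1_ne_nil rest)
        | cons t ts => simp
      · rw [show PySem.Chars.splitOn.go ['_'] (fuel + 1) (c :: rest) cur acc
              = PySem.Chars.splitOn.go ['_'] fuel rest (c :: cur) acc by
            simp only [PySem.Chars.splitOn.go, List.isPrefixOf]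
            rw [if_neg]
            simp only [beq_iff_eq, Bool.and_eq_true]
            intro h'
            exact absurd h'.1.symm hc]
        rw [ih rest (c :: cur) acc (by simpa using Nat.lt_of_succ_lt_succ h)]
        simp only [pvSplit1, if_neg hc]
        cases hts : pvSplit1 rest with
        | nil => exact absurd hts (pvSplit1_ne_nil rest)
        | cons t ts => simp

lemma pv_splitOn_eq (l : List Char) : PySem.Chars.splitOn l ['_'] = pvSplit1 l := by
  rw [PySem.Chars.splitOn, pv_splitOn_go (l.length + 1) l [] [] (by omega)]
  cases hts : pvSplit1 l with
  | nil => exact absurd hts (pvSplit1_ne_nil l)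
  | cons t ts => simp

lemma pv_scan_eq (conv : List (List Char)) (cs : List Char) :
    ∀ (k : Nat) (p : List Char) (ps : List (List Char)),
      pvSplit1 cs = p :: ps → pvScan conv cs k = p ++ pvInter conv k ps := by
  induction cs with
  | nil =>
    intro k p ps h
    simp only [pvSplit1] at h
    cases h
    simp [pvScan, pvInter]
  | cons c cs ih =>
    intro k p ps h
    by_cases hc : c = '_'
    · subst hc
      simp only [pvSplit1] at h
      cases h
      cases hts : pvSplit1 cs with
      | nil => exact absurd hts (pvSplit1_ne_nil cs)
      | cons t ts =>
        simp [pvScan, pvInter, ih (k + 1) t ts hts]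
    · simp only [pvSplit1, if_neg hc] at h
      cases hts : pvSplit1 cs with
      | nil => exact absurd hts (pvSplit1_ne_nil cs)
      | cons t ts =>
        rw [hts] at h
        simp only [List.modifyHead] at h
        cases h
        simp only [pvScan, if_neg hc, List.cons_append]
        rw [ih k t ps hts]

lemma pv_conv_eq (integer_set : List Int) :
    ∀ acc : List (List Char),
      integer_set.foldl (fun acc inte => acc ++ [integer2Chinese inte]) acc
        = acc ++ integer_set.map (fun i => integer2Chinese i) := by
  induction integer_set with
  | nil => intro acc; simp
  | cons i l ih => intro acc; simp [List.foldl_cons, ih]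

lemma pv_foldB (conv : List (List Char)) (p0 : List Char) (rest : List (List Char)) (n : Nat) :
    ∀ (j : Nat) (acc : List (List Char)), rest.length - j ≤ n →
      (PySem.List.pyRange (j : Int) (rest.length : Int) 1).foldl
        (fun acc idx =>
          acc ++ [(PySem.List.pyGet? conv idx).getD [],
                  (PySem.List.pyGet? (p0 :: rest) (idx + 1)).getD []]) acc
        = acc ++ pvPieces conv rest j := by
  induction n with
  | zero =>
    intro j acc h
    rw [PySem.List.pyRange_one_eq_nil (by omega), pvPieces, dif_neg (by omega)]
    simp
  | succ n ih =>
    intro j acc h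
    by_cases hj : j < rest.length
    · rw [PySem.List.pyRange_one_cons (by omega), List.foldl_cons,
          show ((j : Int) + 1) = ((j + 1 : Nat) : Int) by push_cast; ring,
          ih (j + 1) _ (by omega),
          show pvPieces conv rest j = pvGet conv j :: rest[j] :: pvPieces conv rest (j + 1) from by
            rw [pvPieces, dif_pos hj]]
      simp [pvGet, PySem.List.pyGet?_natCast, List.getElem?_eq_getElem hj]
    · rw [PySem.List.pyRange_one_eq_nil (by omega), pvPieces, dif_neg hj]
      simp

lemma pv_flatten_pieces (conv rest : List (List Char)) (n : Nat) :
    ∀ j : Nat, rest.length - j ≤ n →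
      (pvPieces conv rest j).flatten = pvInter conv j (rest.drop j) := by
  induction n with
  | zero =>
    intro j h
    rw [pvPieces, dif_neg (by omega), List.drop_eq_nil_of_le (by omega)]
    simp [pvInter]
  | succ n ih =>
    intro j h
    by_cases hj : j < rest.length
    · rw [pvPieces, dif_pos hj, List.drop_eq_getElem_cons hj]
      simp [pvInter, ih (j + 1) (by omega)]
    · rw [pvPieces, dif_neg hj, List.drop_eq_nil_of_le (by omega)]
      simp [pvInter]

-- ===== VERDICT (by name: the statement is the Claim_ definition above) =====
theorem replaceInteger_spec : Claim_equal_replaceInteger := by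
  intro integer_set sub_str _hdom _hpre
  unfold Spec_replaceInteger replaceInteger replaceInteger_alt
  rw [pv_conv_eq integer_set []]
  simp only [List.nil_append, PySem.List.pyGet?_natCast]
  have hmap : integer_set.map (fun i => integer2Chinese i)
      = integer_set.map (fun i => integer2ChineseB i) := by
    simp [pv_i2c_eq]
  rw [hmap]
  set conv := integer_set.map (fun i => integer2ChineseB i) with hconv
  rw [pv_foldA conv sub_str.toList [] 0, pv_splitOn_eq sub_str.toList]
  cases hts : pvSplit1 sub_str.toList with
  | nil => exact absurd hts (pvSplit1_ne_nil sub_str.toList)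
  | cons p ps =>
    rw [pv_scan_eq conv sub_str.toList 0 p ps hts]
    rw [show (((p :: ps).length : Int) - 1) = (ps.length : Int) by push_cast [List.length_cons]; ring,
        show (0 : Int) = ((0 : Nat) : Int) by simp,
        pv_foldB conv p ps ps.length 0 _ (by omega),
        pv_join_flatten]
    simp [pv_flatten_pieces conv ps ps.length 0 (by omega)]
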